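-- pv_equiv track=rewrite | github.com/amulyakali/proj-WriterCorp | rules/counter_decoder.py | _counter_returnCtrLoc
-- ===== SOURCE A (Python) =====
-- def _counter_returnCtrLoc( finalReturnDict, ctr_key ):
-- 	ll_1 = list( finalReturnDict.keys() )
-- 	ll_1.sort()
-- 	idx = 0
-- 	for ele in ll_1:
-- 		if len( finalReturnDict[ ele ] ) == 0: continue
-- 		if ctr_key == ele: return idx
-- 		idx += 1
-- ===== SOURCE B (Python) =====
-- def _counter_returnCtrLoc(finalReturnDict, ctr_key):
--     # Single pass, no sort: the sorted index of ctr_key among non-empty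
--     # entries is the number of non-empty keys strictly below it.
--     cnt = 0
--     found = False
--     for k, v in finalReturnDict.items():
--         if len(v) == 0:
--             continue
--         if k == ctr_key:
--             found = True
--         elif k < ctr_key:
--             cnt += 1
--     return cnt if found else None
-- ===== Notes on version B (the rewrite author's own statement) =====
-- stated objective: faster
-- what changed: Instead of sorting all keys and walking them with a running index, B makes one unsorted pass over the dict counting non-empty keys strictly smaller than ctr_key (and noting whether ctr_key itself has a non-empty list), which is exactly its index in the sorted order.
import Mathlib
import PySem

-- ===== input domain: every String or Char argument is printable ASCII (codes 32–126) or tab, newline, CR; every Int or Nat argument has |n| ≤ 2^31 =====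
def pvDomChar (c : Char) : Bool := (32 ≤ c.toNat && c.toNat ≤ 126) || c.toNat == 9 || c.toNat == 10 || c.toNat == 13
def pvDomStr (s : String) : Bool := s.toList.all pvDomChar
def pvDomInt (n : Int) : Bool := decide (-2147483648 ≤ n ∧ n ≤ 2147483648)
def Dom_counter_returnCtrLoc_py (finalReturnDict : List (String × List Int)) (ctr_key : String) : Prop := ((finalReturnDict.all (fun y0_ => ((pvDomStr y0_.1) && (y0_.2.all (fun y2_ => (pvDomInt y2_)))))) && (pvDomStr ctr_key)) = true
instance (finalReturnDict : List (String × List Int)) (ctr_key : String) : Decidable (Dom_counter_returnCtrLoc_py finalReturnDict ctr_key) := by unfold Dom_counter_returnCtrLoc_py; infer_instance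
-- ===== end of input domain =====

-- B replaces A's sort-then-scan by one unsorted pass counting non-empty keys below ctr_key
-- (no sort); Pre_ states the Python-dict invariant (distinct keys) of the association list.


-- ===== PORT A =====
-- finalReturnDict[ele]: first-match association-list lookup; ele is always drawn from the
-- key list, so the [] default is unreachable at A's call site (exact on keys present).
def pvLookup (d : List (String × List Int)) (e : String) : List Int :=
  ((d.find? (fun p => p.1 == e)).map Prod.snd).getD []

-- the 'for ele in ll_1' loop with its early return and running idx
def pvALoop (d : List (String × List Int)) (k : String) : List String → Int → Option Int
  | [], _ => none
  | e :: rest, idx =>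
    if (pvLookup d e).length = 0 then pvALoop d k rest idx
    else if k = e then some idx
    else pvALoop d k rest (idx + 1)

def counter_returnCtrLoc_py (finalReturnDict : List (String × List Int)) (ctr_key : String) : Option Int :=
  let ll_1 := PySem.List.sorted (finalReturnDict.map Prod.fst) (fun x => x) false
  pvALoop finalReturnDict ctr_key ll_1 0

-- ===== PORT B =====
def counter_returnCtrLoc_py_alt (finalReturnDict : List (String × List Int)) (ctr_key : String) : Option Int :=
  let st := finalReturnDict.foldl (fun (st : Int × Bool) (p : String × List Int) =>
    if p.2.length = 0 then st
    else if p.1 = ctr_key then (st.1, true)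
    else if p.1 < ctr_key then (st.1 + 1, st.2)
    else st) (0, false)
  if st.2 then some st.1 else none

-- ===== PRECONDITION & SPEC =====
-- Pre_ excludes association lists with duplicate keys: they do not represent a Python dict
-- (dict keys are unique), so A's Python never receives them.
def Pre_counter_returnCtrLoc_py (finalReturnDict : List (String × List Int)) (ctr_key : String) : Prop :=
  (finalReturnDict.map Prod.fst).Nodup
instance (finalReturnDict : List (String × List Int)) (ctr_key : String) : Decidable (Pre_counter_returnCtrLoc_py finalReturnDict ctr_key) := by unfold Pre_counter_returnCtrLoc_py; infer_instance

def pvWitness_counter_returnCtrLoc_py : (List (String × List Int)) × String :=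
  ([("a", [1]), ("b", [])], "a")

def Spec_counter_returnCtrLoc_py (finalReturnDict : List (String × List Int)) (ctr_key : String) (out : Option Int) : Prop := out = counter_returnCtrLoc_py_alt finalReturnDict ctr_key
instance (finalReturnDict : List (String × List Int)) (ctr_key : String) (out : Option Int) : Decidable (Spec_counter_returnCtrLoc_py finalReturnDict ctr_key out) := by unfold Spec_counter_returnCtrLoc_py; infer_instance

-- ===== CLAIM (what is proved, stated in full; the proofs are below) =====
def Claim_equal_counter_returnCtrLoc_py : Prop := ∀ (finalReturnDict : List (String × List Int)) (ctr_key : String), Dom_counter_returnCtrLoc_py finalReturnDict ctr_key → Pre_counter_returnCtrLoc_py finalReturnDict ctr_key → Spec_counter_returnCtrLoc_py finalReturnDict ctr_key (counter_returnCtrLoc_py finalReturnDict ctr_key)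

-- ===== LEMMAS AND PROOFS =====

-- With distinct keys, looking a member entry's key up returns that entry's value.
lemma pvLookup_mem (d : List (String × List Int)) (hnd : (d.map Prod.fst).Nodup) :
    ∀ p ∈ d, pvLookup d p.1 = p.2 := by
  induction d with
  | nil => intro p hp; cases hp
  | cons q rest ih =>
    intro p hp
    simp only [List.map_cons, List.nodup_cons] at hnd
    rcases List.mem_cons.mp hp with h | h
    · subst h; simp [pvLookup]
    · have hne : q.1 ≠ p.1 := fun he =>
        hnd.1 (he ▸ List.mem_map_of_mem h)
      have := ih hnd.2 p h
      simpa [pvLookup, hne] using this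

-- Characterisation of A's loop on a strictly increasing key list.
lemma pvALoop_char (d : List (String × List Int)) (k : String) :
    ∀ (ks : List String) (idx : Int), ks.Pairwise (· < ·) →
    pvALoop d k ks idx =
      if k ∈ ks ∧ (pvLookup d k).length ≠ 0 then
        some (idx + (ks.countP (fun e => decide (e < k) && !((pvLookup d e).length == 0)) : Int))
      else none := by
  intro ks
  induction ks with
  | nil => intro idx _; simp [pvALoop]
  | cons e rest ih =>
    intro idx hpw
    have hlt : ∀ y ∈ rest, e < y := fun y hy => List.rel_of_pairwise_cons hpw hy
    have hpw' : rest.Pairwise (· < ·) := hpw.of_cons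
    simp only [pvALoop]
    by_cases h0 : (pvLookup d e).length = 0
    · rw [if_pos h0, ih idx hpw']
      by_cases hke : k = e
      · subst hke
        have hnr : k ∉ rest := fun h => lt_irrefl k (hlt k h)
        simp [h0, hnr]
      · have hmem : (k ∈ e :: rest) ↔ (k ∈ rest) := by simp [hke]
        simp only [List.countP_cons, h0]
        simp [hmem]
    · rw [if_neg h0]
      by_cases hke : k = e
      · subst hke
        have hc : (k :: rest).countP (fun e => decide (e < k) && !((pvLookup d e).length == 0)) = 0 := by
          rw [List.countP_eq_zero]
          intro y hy
          rcases List.mem_cons.mp hy with h | h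
          · subst h
            simp
          · have : ¬ y < k := not_lt_of_gt (hlt y h)
            simp [this]
        have hcnd : k ∈ (k :: rest) ∧ (pvLookup d k).length ≠ 0 :=
          ⟨List.mem_cons.mpr (Or.inl rfl), h0⟩
        rw [if_pos hcnd, hc]
        simp
      · rw [if_neg hke, ih (idx + 1) hpw']
        by_cases hin : k ∈ rest ∧ (pvLookup d k).length ≠ 0
        · have hek : e < k := hlt k hin.1
          rw [if_pos hin, if_pos ⟨List.mem_cons_of_mem _ hin.1, hin.2⟩]
          have hpred : (decide (e < k) && !((pvLookup d e).length == 0)) = true := by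
            simp [hek, h0]
          simp only [List.countP_cons, hpred, if_true]
          congr 1
          push_cast
          ring
        · rw [if_neg hin, if_neg]
          intro ⟨hm, hl⟩
          exact hin ⟨(List.mem_cons.mp hm).resolve_left hke, hl⟩

-- B's fold computes the count of smaller non-empty keys and a found flag.
lemma pvBFold (k : String) (d : List (String × List Int)) :
    ∀ (c : Int) (f : Bool),
    d.foldl (fun (st : Int × Bool) (p : String × List Int) =>
      if p.2.length = 0 then st
      else if p.1 = k then (st.1, true)
      else if p.1 < k then (st.1 + 1, st.2)
      else st) (c, f)
    = (c + (d.countP (fun p => decide (p.1 < k) && !(p.2.length == 0)) : Int),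
       f || d.any (fun p => p.1 == k && !(p.2.length == 0))) := by
  induction d with
  | nil => intro c f; simp
  | cons p rest ih =>
    intro c f
    simp only [List.foldl_cons, List.countP_cons, List.any_cons]
    by_cases h0 : p.2.length = 0
    · rw [if_pos h0, ih]
      simp [h0]
    · rw [if_neg h0]
      have h0f : (p.2.length == 0) = false := by simp [h0]
      by_cases hk : p.1 = k
      · have hnl : ¬ p.1 < k := by rw [hk]; exact lt_irrefl k
        rw [if_pos hk, ih]
        simp [h0f, hk]
      · have hkf : (p.1 == k) = false := by simp [hk]
        rw [if_neg hk]
        by_cases hl : p.1 < k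
        · rw [if_pos hl, ih]
          have hpred : (decide (p.1 < k) && !(p.2.length == 0)) = true := by simp [hl, h0]
          simp only [hpred, if_true, hkf, Bool.false_and, Bool.false_or,
            Prod.mk.injEq]
          refine ⟨?_, trivial⟩
          push_cast
          ring
        · rw [if_neg hl, ih]
          simp [h0f, hl, hkf]

lemma pvFound_iff (d : List (String × List Int)) (k : String)
    (hnd : (d.map Prod.fst).Nodup) :
    (d.any (fun p => p.1 == k && !(p.2.length == 0)) = true)
      ↔ (k ∈ d.map Prod.fst ∧ (pvLookup d k).length ≠ 0) := by
  constructor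
  · intro h
    rcases List.any_eq_true.mp h with ⟨p, hp, hcond⟩
    simp only [Bool.and_eq_true, beq_iff_eq, Bool.not_eq_eq_eq_not, Bool.not_true,
      beq_eq_false_iff_ne] at hcond
    refine ⟨hcond.1 ▸ List.mem_map_of_mem hp, ?_⟩
    rw [← hcond.1, pvLookup_mem d hnd p hp]
    exact hcond.2
  · intro ⟨hm, hl⟩
    rcases List.mem_map.mp hm with ⟨p, hp, hpk⟩
    refine List.any_eq_true.mpr ⟨p, hp, ?_⟩
    have := pvLookup_mem d hnd p hp
    rw [hpk] at this
    simp only [hpk, this] at hl ⊢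
    simp [hl]

-- ===== VERDICT (by name: the statement is the Claim_ definition above) =====
theorem counter_returnCtrLoc_py_spec : Claim_equal_counter_returnCtrLoc_py := by
  intro d k _ hpre
  unfold Spec_counter_returnCtrLoc_py counter_returnCtrLoc_py counter_returnCtrLoc_py_alt
  have hnd : (d.map Prod.fst).Nodup := hpre
  set ks := PySem.List.sorted (d.map Prod.fst) (fun x => x) false with hks
  have hperm : ks.Perm (d.map Prod.fst) := PySem.List.sorted_perm _ _ _
  have hksnd : ks.Nodup := hperm.nodup_iff.mpr hnd
  have hle : ks.Pairwise (fun a b => a ≤ b) := PySem.List.sorted_pairwise _ _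
  have hpw : ks.Pairwise (· < ·) :=
    (hle.and hksnd).imp (fun h => lt_of_le_of_ne h.1 h.2)
  rw [pvALoop_char d k ks 0 hpw, pvBFold k d 0 false]
  have hcount : ks.countP (fun e => decide (e < k) && !((pvLookup d e).length == 0))
      = d.countP (fun p => decide (p.1 < k) && !(p.2.length == 0)) := by
    rw [hperm.countP_eq, List.countP_map]
    exact List.countP_congr (fun p hp => by
      simp [Function.comp, pvLookup_mem d hnd p hp])
  have hmem : k ∈ ks ↔ k ∈ d.map Prod.fst := hperm.mem_iff
  by_cases hcond : k ∈ d.map Prod.fst ∧ (pvLookup d k).length ≠ 0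
  · rw [if_pos ⟨hmem.mpr hcond.1, hcond.2⟩, hcount]
    have hfound := (pvFound_iff d k hnd).mpr hcond
    simp [hfound]
  · rw [if_neg (fun ⟨hm, hl⟩ => hcond ⟨hmem.mp hm, hl⟩)]
    have hfound : (d.any (fun p => p.1 == k && !(p.2.length == 0))) = false :=
      Bool.eq_false_iff.mpr (fun h => hcond ((pvFound_iff d k hnd).mp h))
    simp [hfound]
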